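-- pv_equiv track=rewrite | github.com/SATA0203/sponge | sponge/app/arch_health/analyzers/coupling_analyzer.py | _detect_god_modules
-- ===== SOURCE A (Python) =====
-- from typing import Dict, List, Any, Set, Tuple
-- from collections import defaultdict
--
-- def _detect_god_modules(dependencies: Dict[str, Set[str]], threshold: int = 10) -> Dict[str, Set[str]]:
--     """Detect modules with too many dependents"""
--     # Reverse the dependency graph
--     dependents = defaultdict(set)
--
--     for module, deps in dependencies.items():
--         for dep in deps:
--             dependents[dep].add(module)
--
--     # Find modules with many dependents
--     return {
--         module: deps
--         for module, deps in dependents.items()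
--         if len(deps) >= threshold
--     }
-- ===== SOURCE B (Python) =====
-- def _detect_god_modules(dependencies, threshold=10):
--     """Detect modules with too many dependents"""
--     # All modules that anything depends on, in first-seen order
--     targets = list(dict.fromkeys(d for deps in dependencies.values() for d in deps))
--     result = {}
--     for t in targets:
--         dependents = {m for m, deps in dependencies.items() if t in deps}
--         if len(dependents) >= threshold:
--             result[t] = dependents
--     return result
-- ===== Notes on version B (the rewrite author's own statement) =====
-- stated objective: alternative
-- what changed: Instead of building a reverse-dependency index dict in one pass, B first collects the deduplicated list of dependency targets and then, per target, rescans all (module, deps) pairs with a set comprehension to gather its dependents.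
import Mathlib
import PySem

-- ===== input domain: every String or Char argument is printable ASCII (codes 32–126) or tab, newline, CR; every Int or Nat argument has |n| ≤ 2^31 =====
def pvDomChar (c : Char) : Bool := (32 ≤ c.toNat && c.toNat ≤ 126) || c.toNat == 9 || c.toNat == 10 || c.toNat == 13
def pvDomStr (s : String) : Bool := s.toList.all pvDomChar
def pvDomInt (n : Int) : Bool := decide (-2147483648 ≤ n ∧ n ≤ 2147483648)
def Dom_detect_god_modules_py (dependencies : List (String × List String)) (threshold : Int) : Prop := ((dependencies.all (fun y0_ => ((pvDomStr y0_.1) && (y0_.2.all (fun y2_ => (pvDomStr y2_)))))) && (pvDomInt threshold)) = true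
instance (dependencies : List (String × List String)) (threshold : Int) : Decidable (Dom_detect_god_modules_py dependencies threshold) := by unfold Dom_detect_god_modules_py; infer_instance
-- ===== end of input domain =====

-- B replaces A's one-pass reverse-index dict with a dedup-targets-then-rescan-per-target decomposition (alternative, not faster).

-- ===== PORT A =====
def detect_god_modules_py (dependencies : List (String × List String)) (threshold : Int) : List (String × List String) :=
  -- dependents = defaultdict(set); for module, deps: for dep in deps: dependents[dep].add(module)
  let dependents : PySem.Dict String (PySem.Set String) :=
    dependencies.foldl
      (fun d p => p.2.foldl (fun d dep => d.modify dep PySem.Set.empty (fun s => PySem.Set.add s p.1)) d)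
      PySem.Dict.empty
  -- {module: deps for module, deps in dependents.items() if len(deps) >= threshold}
  dependents.items.filter (fun pr => decide (threshold ≤ PySem.Set.len pr.2))

-- ===== PORT B =====
def detect_god_modules_py_alt (dependencies : List (String × List String)) (threshold : Int) : List (String × List String) :=
  -- targets = list(dict.fromkeys(d for deps in dependencies.values() for d in deps))
  let targets : List String := PySem.List.dedup (dependencies.flatMap (fun p => p.2))
  -- for t in targets: dependents = {m for m, deps in dependencies.items() if t in deps}; keep if len >= threshold
  targets.foldl
    (fun acc t =>
      let dependents : PySem.Set String :=
        PySem.Set.ofList ((dependencies.filter (fun p => p.2.contains t)).map (fun p => p.1))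
      if decide (threshold ≤ PySem.Set.len dependents) then acc ++ [(t, dependents)] else acc)
    []

-- ===== PRECONDITION & SPEC =====
def Spec_detect_god_modules_py (dependencies : List (String × List String)) (threshold : Int) (out : List (String × List String)) : Prop := out = detect_god_modules_py_alt dependencies threshold
instance (dependencies : List (String × List String)) (threshold : Int) (out : List (String × List String)) : Decidable (Spec_detect_god_modules_py dependencies threshold out) := by unfold Spec_detect_god_modules_py; infer_instance

-- ===== CLAIM (what is proved, stated in full; the proofs are below) =====
def Claim_equal_detect_god_modules_py : Prop := ∀ (dependencies : List (String × List String)) (threshold : Int), Dom_detect_god_modules_py dependencies threshold → Spec_detect_god_modules_py dependencies threshold (detect_god_modules_py dependencies threshold)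

-- ===== LEMMAS AND PROOFS =====

-- effect of the inner loop (one module m, its deps list) on one lookup
theorem getD_inner (deps : List String) (m : String)
    (d : PySem.Dict String (PySem.Set String)) (t : String) :
    (deps.foldl (fun d dep => d.modify dep PySem.Set.empty (fun s => PySem.Set.add s m)) d).getD t PySem.Set.empty
      = if deps.contains t then PySem.Set.add (d.getD t PySem.Set.empty) m
        else d.getD t PySem.Set.empty := by
  induction deps generalizing d with
  | nil => simp
  | cons x xs ih =>
    simp only [List.foldl_cons, ih, PySem.Dict.getD_modify]
    by_cases h : t = x
    · subst h
      simp
    · simp [h]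

-- effect of the whole reverse-graph fold on one lookup
theorem getD_revgraph (L : List (String × List String))
    (d : PySem.Dict String (PySem.Set String)) (t : String) :
    (L.foldl
        (fun d p => p.2.foldl (fun d dep => d.modify dep PySem.Set.empty (fun s => PySem.Set.add s p.1)) d)
        d).getD t PySem.Set.empty
      = PySem.Set.update (d.getD t PySem.Set.empty)
          (((L.filter (fun p => p.2.contains t)).map (fun p => p.1))) := by
  induction L generalizing d with
  | nil => simp [PySem.Set.update]
  | cons p ps ih =>
    simp only [List.foldl_cons, ih, getD_inner]
    by_cases h : t ∈ p.2
    · simp [PySem.Set.update, h]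
    · simp [PySem.Set.update, h]

theorem keys_revgraph (L : List (String × List String))
    (d : PySem.Dict String (PySem.Set String)) :
    (L.foldl
        (fun d p => p.2.foldl (fun d dep => d.modify dep PySem.Set.empty (fun s => PySem.Set.add s p.1)) d)
        d).keys
      = PySem.Set.update d.keys (L.flatMap (fun p => p.2)) := by
  induction L generalizing d with
  | nil => simp [PySem.Set.update]
  | cons p ps ih =>
    simp only [List.foldl_cons, ih, PySem.Dict.keys_foldl_modify, List.flatMap_cons]
    simp [PySem.Set.update, List.foldl_append]

theorem nodup_keys_revgraph (L : List (String × List String))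
    (d : PySem.Dict String (PySem.Set String)) (h : d.keys.Nodup) :
    (L.foldl
        (fun d p => p.2.foldl (fun d dep => d.modify dep PySem.Set.empty (fun s => PySem.Set.add s p.1)) d)
        d).keys.Nodup := by
  induction L generalizing d with
  | nil => exact h
  | cons p ps ih =>
    exact ih _ (PySem.Dict.nodup_keys_foldl_modify_key p.2 id PySem.Set.empty
      (fun _ _ => fun s => PySem.Set.add s p.1) d h)

theorem set_update_empty {α : Type} [BEq α] (xs : List α) :
    PySem.Set.update ([] : PySem.Set α) xs = PySem.Set.ofList xs :=
  (PySem.Set.ofList_eq_foldl xs).symm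

-- ===== VERDICT (by name: the statement is the Claim_ definition above) =====
theorem detect_god_modules_py_spec : Claim_equal_detect_god_modules_py := by
  intro dependencies threshold _
  unfold Spec_detect_god_modules_py detect_god_modules_py detect_god_modules_py_alt
  dsimp only
  rw [PySem.List.foldl_append_if
    (fun t => decide (threshold ≤ PySem.Set.len (PySem.Set.ofList ((dependencies.filter (fun p => p.2.contains t)).map (fun p => p.1)))))
    (fun t => (t, PySem.Set.ofList ((dependencies.filter (fun p => p.2.contains t)).map (fun p => p.1))))]
  have hnd := nodup_keys_revgraph dependencies PySem.Dict.empty (by simp)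
  rw [PySem.Dict.items_eq_map_keys _ hnd PySem.Set.empty]
  rw [keys_revgraph]
  simp only [PySem.Dict.keys_empty, set_update_empty, PySem.List.dedup_eq_ofList,
    getD_revgraph, PySem.Dict.getD_empty, List.nil_append]
  rw [List.filter_map]
  simp only [Function.comp_def]
  rfl
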